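-- pv_equiv track=rewrite | github.com/danswk/misc | uni py/w8.py | triple_riffle
-- ===== SOURCE A (Python) =====
-- def triple_riffle(mylist):
--     if len(mylist)%3==0:
--         listlen=len(mylist)//3
--         lista=mylist[:listlen]
--         listb=mylist[listlen:2*listlen]
--         listc=mylist[2*listlen:]
--         new=[]
--         for i in range(listlen):
--             new.extend([listc[i],listb[i],lista[i]])
--         return new
--     else:
--         return("Please enter a list with length divisible by 3.")
-- ===== SOURCE B (Python) =====
-- def triple_riffle(mylist):
--     n = len(mylist)
--     if n % 3 != 0:
--         return "Please enter a list with length divisible by 3."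
--     k = n // 3
--     return [mylist[(2 - i % 3) * k + i // 3] for i in range(n)]
-- ===== Notes on version B (the rewrite author's own statement) =====
-- stated objective: alternative
-- what changed: Replaces A's split-into-three-slices plus per-index interleave loop by a single comprehension over all n output positions that computes each element directly via the closed-form index map (2 - i%3)*k + i//3 on the original list; no slices, no extend.
import Mathlib
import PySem

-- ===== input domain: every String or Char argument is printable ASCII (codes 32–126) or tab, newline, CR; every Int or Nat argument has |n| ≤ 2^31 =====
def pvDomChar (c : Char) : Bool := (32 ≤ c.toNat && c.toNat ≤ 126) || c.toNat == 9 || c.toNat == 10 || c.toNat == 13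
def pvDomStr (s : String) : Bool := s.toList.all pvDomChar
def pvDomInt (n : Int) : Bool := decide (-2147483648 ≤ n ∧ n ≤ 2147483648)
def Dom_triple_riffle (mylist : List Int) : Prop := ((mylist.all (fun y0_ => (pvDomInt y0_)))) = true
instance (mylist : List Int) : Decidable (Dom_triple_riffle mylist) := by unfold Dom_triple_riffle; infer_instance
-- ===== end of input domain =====

-- B replaces A's three-slice split + per-index interleave loop by one pass over
-- all output positions using the closed-form index map (2 - i%3)*k + i//3 (alternative).


-- ===== PORT A =====
def triple_riffle (mylist : List Int) : List Int :=
  if mylist.length % 3 == 0 then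
    let listlen := mylist.length / 3
    let lista := PySem.List.slice mylist none (some (listlen : Int))
    let listb := PySem.List.slice mylist (some (listlen : Int)) (some ((2 * listlen : Nat) : Int))
    let listc := PySem.List.slice mylist (some ((2 * listlen : Nat) : Int)) none
    (PySem.List.pyRange 0 (listlen : Int) 1).foldl
      (fun new i =>
        new ++ [PySem.List.pyGetD listc i 0, PySem.List.pyGetD listb i 0,
                PySem.List.pyGetD lista i 0]) []
  else []  -- Python returns an error STRING here (not a list of ints): excluded by Pre_

-- ===== PORT B =====
def triple_riffle_alt (mylist : List Int) : List Int :=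
  let n := mylist.length
  if n % 3 == 0 then
    let k := n / 3
    (PySem.List.pyRange 0 (n : Int) 1).map
      (fun i => PySem.List.pyGetD mylist
        ((2 - PySem.Int.mod i 3) * (k : Int) + PySem.Int.floordiv i 3) 0)
  else []  -- Python returns an error STRING here (not a list of ints): excluded by Pre_

-- ===== PRECONDITION & SPEC =====
-- Pre_ excludes lists whose length is not divisible by 3, where A (and B) return an
-- error string rather than a value of the declared List Int type.
def Pre_triple_riffle (mylist : List Int) : Prop := mylist.length % 3 = 0
instance (mylist : List Int) : Decidable (Pre_triple_riffle mylist) := by unfold Pre_triple_riffle; infer_instance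
def pvWitness_triple_riffle : List Int := ([1, 2, 3, 4, 5, 6])

def Spec_triple_riffle (mylist : List Int) (out : List Int) : Prop := out = triple_riffle_alt mylist
instance (mylist : List Int) (out : List Int) : Decidable (Spec_triple_riffle mylist out) := by unfold Spec_triple_riffle; infer_instance

-- ===== CLAIM (what is proved, stated in full; the proofs are below) =====
def Claim_equal_triple_riffle : Prop := ∀ (mylist : List Int), Dom_triple_riffle mylist → Pre_triple_riffle mylist → Spec_triple_riffle mylist (triple_riffle mylist)

-- ===== LEMMAS AND PROOFS =====

-- range (3*k) split into consecutive blocks of three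
lemma range_three (k : Nat) :
    List.range (3 * k) = (List.range k).flatMap (fun j => [3*j, 3*j+1, 3*j+2]) := by
  induction k with
  | zero => simp
  | succ m ih =>
    have h : 3 * (m + 1) = (3 * m + 1) + 1 + 1 := by omega
    rw [h, List.range_succ, List.range_succ, List.range_succ, List.range_succ,
      List.flatMap_append, ← ih]
    simp

-- the index formula, evaluated at 3j, 3j+1, 3j+2
lemma idx_formula (j k : Nat) (m : Nat) (hm : m < 3) :
    (2 - PySem.Int.mod ((3*j+m : Nat) : Int) 3) * (k : Int)
      + PySem.Int.floordiv ((3*j+m : Nat) : Int) 3 = (((2 - m) * k + j : Nat) : Int) := by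
  rw [PySem.Int.mod_eq_emod_of_pos (by omega), PySem.Int.floordiv_eq_ediv_of_pos (by omega)]
  have e1 : ((3*j+m : Nat) : Int) % 3 = (m : Int) := by push_cast; omega
  have e2 : ((3*j+m : Nat) : Int) / 3 = (j : Int) := by push_cast; omega
  rw [e1, e2]
  push_cast [Nat.cast_sub (show m ≤ 2 by omega)]
  ring

lemma triple_riffle_eq_alt (mylist : List Int) (h : mylist.length % 3 = 0) :
    triple_riffle mylist = triple_riffle_alt mylist := by
  unfold triple_riffle triple_riffle_alt
  simp only [h, beq_self_eq_true, if_true]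
  set k := mylist.length / 3 with hk
  have hlen : mylist.length = 3 * k := by omega
  -- A side: foldl → flatMap over range k on getD of the three slices
  rw [PySem.List.foldl_append_eq_flatMap]
  rw [PySem.List.slice_to_natCast, PySem.List.slice_from_natCast, PySem.List.slice_natCast]
  rw [PySem.List.pyRange_zero_natCast]
  rw [List.flatMap_map]
  simp only [PySem.List.pyGetD_natCast, List.nil_append]
  -- B side: map over range (3k) → flatMap of blocks of three
  rw [PySem.List.pyRange_zero_natCast, hlen, range_three, List.map_flatMap, List.map_flatMap]
  apply List.flatMap_congr
  intro j hj
  have hjk : j < k := List.mem_range.mp hj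
  simp only [List.map_cons, List.map_nil]
  have f0 := idx_formula j k 0 (by omega)
  rw [Nat.add_zero] at f0
  rw [f0, idx_formula j k 1 (by omega), idx_formula j k 2 (by omega)]
  simp only [PySem.List.pyGetD_natCast]
  have h0 : (2 - 0) * k + j = 2 * k + j := by omega
  have h1 : (2 - 1) * k + j = k + j := by omega
  have h2 : (2 - 2) * k + j = j := by omega
  rw [h0, h1, h2]
  -- compare the three getD's against getD of the original list
  have hc : (mylist.drop (2 * k)).getD j 0 = mylist.getD (2 * k + j) 0 := by
    simp [List.getD, List.getElem?_drop]
  have hb : ((mylist.drop k).take (2 * k - k)).getD j 0 = mylist.getD (k + j) 0 := by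
    have : 2 * k - k = k := by omega
    rw [this]
    simp [List.getD, hjk, List.getElem?_drop]
  have ha : (mylist.take k).getD j 0 = mylist.getD j 0 := by
    simp [List.getD, hjk]
  rw [hc, hb, ha]

-- ===== VERDICT (by name: the statement is the Claim_ definition above) =====
theorem triple_riffle_spec : Claim_equal_triple_riffle := by
  intro mylist _ hpre
  unfold Spec_triple_riffle
  exact triple_riffle_eq_alt mylist hpre
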